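-- pv_equiv track=rewrite | github.com/UltiRequiem/uni | test/e1.py | insert_w
-- ===== SOURCE A (Python) =====
-- def insert_w(seq_u, w, max_k):
--     seq_v_new = []
--     inserted = False
--     idx_u = 0
--     while idx_u < len(seq_u) and len(seq_v_new) < max_k:
--         if not inserted and seq_u[idx_u] < w:
--             seq_v_new.append(w)
--             inserted = True
--             if len(seq_v_new) == max_k:
--                 break
--         seq_v_new.append(seq_u[idx_u])
--         idx_u += 1
--     if not inserted and len(seq_v_new) < max_k:
--         seq_v_new.append(w)
--     return seq_v_new[:max_k]
-- ===== SOURCE B (Python) =====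
-- def insert_w(seq_u, w, max_k):
--     i = next((k for k, x in enumerate(seq_u) if x < w), len(seq_u))
--     return (seq_u[:i] + [w] + seq_u[i:])[:max(max_k, 0)]
-- ===== Notes on version B (the rewrite author's own statement) =====
-- stated objective: simpler
-- what changed: A's single pass that copies elements one by one while tracking an 'inserted' flag and the output length cap is replaced by: find the insertion index (first element < w), build the result by slice concatenation, truncate once at the end.
import Mathlib
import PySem

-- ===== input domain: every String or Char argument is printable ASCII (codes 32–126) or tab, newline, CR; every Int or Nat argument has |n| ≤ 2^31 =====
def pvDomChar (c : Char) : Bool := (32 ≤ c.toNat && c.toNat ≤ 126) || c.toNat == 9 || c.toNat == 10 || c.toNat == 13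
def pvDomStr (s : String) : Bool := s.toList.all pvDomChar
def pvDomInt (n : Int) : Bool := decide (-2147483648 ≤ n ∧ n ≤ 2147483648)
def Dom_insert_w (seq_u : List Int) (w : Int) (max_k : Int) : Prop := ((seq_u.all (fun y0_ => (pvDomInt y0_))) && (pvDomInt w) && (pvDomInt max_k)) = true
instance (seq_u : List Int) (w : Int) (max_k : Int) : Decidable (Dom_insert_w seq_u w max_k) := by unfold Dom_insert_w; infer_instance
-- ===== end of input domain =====

-- B replaces A's copy-loop with inserted/length bookkeeping by: find the insertion index, build by slice
-- concatenation, truncate once (objective: simpler).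

-- ===== PORT A =====
-- the while loop: state (idx_u, inserted, seq_v_new); returns (seq_v_new, inserted)
def insertWLoop (seq_u : List Int) (w : Int) (max_k : Int) (idx : Nat) (inserted : Bool) (acc : List Int) : List Int × Bool :=
  if h : idx < seq_u.length ∧ (acc.length : Int) < max_k then
    if inserted = false ∧ PySem.List.pyGetD seq_u (idx : Int) 0 < w then
      if ((acc ++ [w]).length : Int) = max_k then (acc ++ [w], true)
      else insertWLoop seq_u w max_k (idx + 1) true ((acc ++ [w]) ++ [PySem.List.pyGetD seq_u (idx : Int) 0])
    else insertWLoop seq_u w max_k (idx + 1) inserted (acc ++ [PySem.List.pyGetD seq_u (idx : Int) 0])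
  else (acc, inserted)
termination_by seq_u.length - idx
decreasing_by all_goals omega

def insert_w (seq_u : List Int) (w : Int) (max_k : Int) : List Int :=
  let r := insertWLoop seq_u w max_k 0 false []
  let fin := if r.2 = false ∧ ((r.1.length : Int) < max_k) then r.1 ++ [w] else r.1
  PySem.List.slice fin none (some max_k)

-- ===== PORT B =====
-- Source B: i = first index with seq_u[i] < w (len(seq_u) if none) — exactly List.findIdx; the slices
-- seq_u[:i], seq_u[i:] with 0 ≤ i ≤ len are exactly take/drop, and [:max(max_k,0)] is take.
def insert_w_alt (seq_u : List Int) (w : Int) (max_k : Int) : List Int :=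
  let i := seq_u.findIdx (fun x => x < w)
  (seq_u.take i ++ [w] ++ seq_u.drop i).take (max max_k 0).toNat

-- ===== PRECONDITION & SPEC =====
def Spec_insert_w (seq_u : List Int) (w : Int) (max_k : Int) (out : List Int) : Prop := out = insert_w_alt seq_u w max_k
instance (seq_u : List Int) (w : Int) (max_k : Int) (out : List Int) : Decidable (Spec_insert_w seq_u w max_k out) := by unfold Spec_insert_w; infer_instance

-- ===== CLAIM (what is proved, stated in full; the proofs are below) =====
def Claim_equal_insert_w : Prop := ∀ (seq_u : List Int) (w : Int) (max_k : Int), Dom_insert_w seq_u w max_k → Spec_insert_w seq_u w max_k (insert_w seq_u w max_k)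

-- ===== LEMMAS AND PROOFS =====

theorem pv_take_take (l : List Int) (k m : Nat) (h : m ≤ k ∨ l.length ≤ k) :
    (l.take k).take m = l.take m := by
  rcases h with h | h
  · rw [List.take_take, Nat.min_eq_left h]
  · rw [List.take_of_length_le h]

-- "full" = the uncapped inserted list of B; i = insertion index
theorem pv_findIdx_le (seq_u : List Int) (w : Int) : seq_u.findIdx (fun x => x < w) ≤ seq_u.length :=
  List.findIdx_le_length

theorem pv_full_take_le (seq_u : List Int) (w : Int) (m : Nat)
    (hm : m ≤ seq_u.findIdx (fun x => x < w)) :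
    (seq_u.take (seq_u.findIdx (fun x => x < w)) ++ [w] ++ seq_u.drop (seq_u.findIdx (fun x => x < w))).take m
      = seq_u.take m := by
  have hi : seq_u.findIdx (fun x => x < w) ≤ seq_u.length := pv_findIdx_le seq_u w
  rw [List.take_append_of_le_length (by simp only [List.length_append, List.length_take, List.length_drop, List.length_cons, List.length_nil]; omega), List.take_append_of_le_length (by simp only [List.length_append, List.length_take, List.length_drop, List.length_cons, List.length_nil]; omega)]
  exact pv_take_take seq_u _ m (Or.inl hm)

theorem pv_full_length (seq_u : List Int) (w : Int) :
    (seq_u.take (seq_u.findIdx (fun x => x < w)) ++ [w] ++ seq_u.drop (seq_u.findIdx (fun x => x < w))).length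
      = seq_u.length + 1 := by
  have hi : seq_u.findIdx (fun x => x < w) ≤ seq_u.length := pv_findIdx_le seq_u w
  simp only [List.length_append, List.length_take, List.length_drop, List.length_cons, List.length_nil]
  omega

theorem pv_full_take_succ (seq_u : List Int) (w : Int) :
    (seq_u.take (seq_u.findIdx (fun x => x < w)) ++ [w] ++ seq_u.drop (seq_u.findIdx (fun x => x < w))).take
      (seq_u.findIdx (fun x => x < w) + 1)
      = seq_u.take (seq_u.findIdx (fun x => x < w)) ++ [w] := by
  have hi : seq_u.findIdx (fun x => x < w) ≤ seq_u.length := pv_findIdx_le seq_u w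
  rw [List.take_append_of_le_length (by simp only [List.length_append, List.length_take, List.length_drop, List.length_cons, List.length_nil]; omega)]
  exact List.take_of_length_le (by simp only [List.length_append, List.length_take, List.length_drop, List.length_cons, List.length_nil]; omega)

-- capping the prefix-with-w agrees with capping full, when the cap fits or the list is exhausted
theorem pv_prefix_cap (seq_u : List Int) (w : Int) (m : Nat)
    (h : m ≤ seq_u.findIdx (fun x => x < w) + 1 ∨ seq_u.findIdx (fun x => x < w) = seq_u.length) :
    (seq_u.take (seq_u.findIdx (fun x => x < w)) ++ [w]).take m
      = (seq_u.take (seq_u.findIdx (fun x => x < w)) ++ [w] ++ seq_u.drop (seq_u.findIdx (fun x => x < w))).take m := by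
  have hi : seq_u.findIdx (fun x => x < w) ≤ seq_u.length := pv_findIdx_le seq_u w
  rcases h with h | h
  · symm
    exact List.take_append_of_le_length (by simp only [List.length_append, List.length_take, List.length_drop, List.length_cons, List.length_nil]; omega)
  · have hd : seq_u.drop (seq_u.findIdx (fun x => x < w)) = [] := by rw [h]; simp
    rw [hd, List.append_nil]

theorem pv_full_take_step (seq_u : List Int) (w : Int) (j : Nat)
    (hij : seq_u.findIdx (fun x => x < w) ≤ j) (hj : j < seq_u.length) :
    (seq_u.take (seq_u.findIdx (fun x => x < w)) ++ [w] ++ seq_u.drop (seq_u.findIdx (fun x => x < w))).take (j + 2)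
      = (seq_u.take (seq_u.findIdx (fun x => x < w)) ++ [w] ++ seq_u.drop (seq_u.findIdx (fun x => x < w))).take (j + 1)
        ++ [seq_u.getD j 0] := by
  have hi : seq_u.findIdx (fun x => x < w) ≤ seq_u.length := pv_findIdx_le seq_u w
  rw [show j + 2 = (j + 1) + 1 by rfl, List.take_add_one]
  congr 1
  rw [List.getElem?_append_right (by simp only [List.length_append, List.length_take, List.length_drop, List.length_cons, List.length_nil]; omega), List.getElem?_drop]
  have hlen : (seq_u.take (seq_u.findIdx (fun x => x < w)) ++ [w]).length
      = seq_u.findIdx (fun x => x < w) + 1 := by simp; omega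
  rw [hlen]
  have harg : seq_u.findIdx (fun x => x < w) + (j + 1 - (seq_u.findIdx (fun x => x < w) + 1)) = j := by omega
  rw [harg, List.getElem?_eq_getElem hj, List.getD_eq_getElem seq_u 0 hj]
  simp

theorem pv_loopB (seq_u : List Int) (w : Int) (max_k : Int) (hk : 0 < max_k) :
    ∀ (fuel idx : Nat) (acc : List Int), seq_u.length - idx = fuel →
      seq_u.findIdx (fun x => x < w) ≤ idx → idx ≤ seq_u.length →
      acc = (seq_u.take (seq_u.findIdx (fun x => x < w)) ++ [w] ++ seq_u.drop (seq_u.findIdx (fun x => x < w))).take (idx + 1) →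
      (insertWLoop seq_u w max_k idx true acc).2 = true ∧
      (insertWLoop seq_u w max_k idx true acc).1.take max_k.toNat
        = (seq_u.take (seq_u.findIdx (fun x => x < w)) ++ [w] ++ seq_u.drop (seq_u.findIdx (fun x => x < w))).take max_k.toNat := by
  intro fuel
  induction fuel with
  | zero =>
    intro idx acc hfuel hij hlen hacc
    rw [insertWLoop, dif_neg (by omega)]
    refine ⟨rfl, ?_⟩
    rw [hacc]
    exact pv_take_take _ _ _ (Or.inr (by rw [pv_full_length seq_u w]; omega))
  | succ n ih =>
    intro idx acc hfuel hij hlen hacc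
    have hacclen : acc.length = idx + 1 := by
      rw [hacc, List.length_take, pv_full_length seq_u w]; omega
    by_cases hc : idx < seq_u.length ∧ (acc.length : Int) < max_k
    · rw [insertWLoop, dif_pos hc, if_neg (by simp)]
      apply ih (idx + 1) _ (by omega) (by omega) (by omega)
      rw [hacc, PySem.List.pyGetD_natCast]
      exact (pv_full_take_step seq_u w idx hij hc.1).symm
    · rw [insertWLoop, dif_neg hc]
      refine ⟨rfl, ?_⟩
      rw [hacc]
      apply pv_take_take
      rw [hacclen] at hc
      by_cases hidx : idx = seq_u.length
      · exact Or.inr (by rw [pv_full_length seq_u w]; omega)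
      · exact Or.inl (by omega)

theorem pv_loopA (seq_u : List Int) (w : Int) (max_k : Int) (hk : 0 < max_k) :
    ∀ (fuel idx : Nat), seq_u.length - idx = fuel → idx ≤ seq_u.findIdx (fun x => x < w) →
      (let r := insertWLoop seq_u w max_k idx false (seq_u.take idx);
       (if r.2 = false ∧ ((r.1.length : Int) < max_k) then r.1 ++ [w] else r.1).take max_k.toNat)
      = (seq_u.take (seq_u.findIdx (fun x => x < w)) ++ [w] ++ seq_u.drop (seq_u.findIdx (fun x => x < w))).take max_k.toNat := by
  intro fuel
  induction fuel with
  | zero =>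
    intro idx hfuel hii
    have hi : seq_u.findIdx (fun x => x < w) ≤ seq_u.length := pv_findIdx_le seq_u w
    have hidx : idx = seq_u.length := by omega
    have hieq : seq_u.findIdx (fun x => x < w) = seq_u.length := by omega
    rw [insertWLoop, dif_neg (by omega)]
    simp only
    have hlen : (seq_u.take idx).length = idx := by simp; omega
    split_ifs with hpost
    · rw [hlen] at hpost
      have h1 : seq_u.take idx = seq_u.take (seq_u.findIdx (fun x => x < w)) := by rw [hidx, hieq]
      rw [h1, pv_prefix_cap seq_u w _ (Or.inr hieq)]
    · rw [hlen] at hpost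
      have hcap : max_k ≤ (idx : Int) := by
        by_contra hcon
        exact hpost ⟨by trivial, by omega⟩
      rw [pv_take_take _ _ _ (Or.inl (by omega))]
      exact (pv_full_take_le seq_u w max_k.toNat (by omega)).symm
  | succ n ih =>
    intro idx hfuel hii
    have hi : seq_u.findIdx (fun x => x < w) ≤ seq_u.length := pv_findIdx_le seq_u w
    have hlen : (seq_u.take idx).length = idx := by simp; omega
    by_cases hc : idx < seq_u.length ∧ ((seq_u.take idx).length : Int) < max_k
    · by_cases hlti : idx < seq_u.findIdx (fun x => x < w)
      · -- the element is not < w: copy it and continue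
        have hp : (decide (seq_u[idx] < w)) = false := by
          simpa using List.not_of_lt_findIdx hlti
        rw [insertWLoop, dif_pos hc, if_neg (by
          rw [PySem.List.pyGetD_natCast, List.getD_eq_getElem seq_u 0 hc.1]
          intro hcon
          exact absurd (by simpa using hcon.2) (by simpa using hp))]
        have hstep : seq_u.take idx ++ [PySem.List.pyGetD seq_u (idx : Int) 0] = seq_u.take (idx + 1) := by
          rw [PySem.List.pyGetD_natCast, List.take_add_one, List.getElem?_eq_getElem hc.1,
              List.getD_eq_getElem seq_u 0 hc.1]
          rfl
        rw [hstep]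
        exact ih (idx + 1) (by omega) (by omega)
      · -- idx = findIdx: insert w here
        have hieq : idx = seq_u.findIdx (fun x => x < w) := by omega
        have hfi : seq_u.findIdx (fun x => x < w) < seq_u.length := by omega
        have hp : seq_u.getD idx 0 < w := by
          rw [hieq, List.getD_eq_getElem seq_u 0 hfi]
          simpa using List.findIdx_getElem (p := fun x => decide (x < w)) (xs := seq_u) (w := hfi)
        rw [insertWLoop, dif_pos hc, if_pos (show _ ∧ _ from
          ⟨by trivial, by rw [PySem.List.pyGetD_natCast]; exact hp⟩)]
        rw [hieq]
        by_cases hfull : (((seq_u.take (seq_u.findIdx (fun x => x < w)) ++ [w]).length : Int) = max_k)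
        · rw [if_pos hfull]
          simp only
          rw [if_neg (by simp)]
          apply pv_prefix_cap seq_u w
          refine Or.inl ?_
          simp only [List.length_append, List.length_take, List.length_cons, List.length_nil] at hfull
          omega
        · rw [if_neg hfull]
          have hnext : (seq_u.take (seq_u.findIdx (fun x => x < w)) ++ [w]) ++ [PySem.List.pyGetD seq_u ((seq_u.findIdx (fun x => x < w) : Nat) : Int) 0]
              = (seq_u.take (seq_u.findIdx (fun x => x < w)) ++ [w] ++ seq_u.drop (seq_u.findIdx (fun x => x < w))).take (seq_u.findIdx (fun x => x < w) + 1 + 1) := by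
            rw [PySem.List.pyGetD_natCast,
                pv_full_take_step seq_u w (seq_u.findIdx (fun x => x < w)) (le_refl _) hfi,
                pv_full_take_succ seq_u w]
          rw [hnext]
          have hB := pv_loopB seq_u w max_k hk (seq_u.length - (seq_u.findIdx (fun x => x < w) + 1)) (seq_u.findIdx (fun x => x < w) + 1)
            ((seq_u.take (seq_u.findIdx (fun x => x < w)) ++ [w] ++ seq_u.drop (seq_u.findIdx (fun x => x < w))).take (seq_u.findIdx (fun x => x < w) + 1 + 1))
            rfl (by omega) (by omega) rfl
          simp only
          split_ifs with hpost
          · rw [hB.1] at hpost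
            simp at hpost
          · exact hB.2
    · -- the loop does not run
      rw [insertWLoop, dif_neg hc]
      simp only
      rw [hlen] at hc
      split_ifs with hpost
      · rw [hlen] at hpost
        have hidx : idx = seq_u.length := by omega
        have hieq : seq_u.findIdx (fun x => x < w) = seq_u.length := by omega
        have h1 : seq_u.take idx = seq_u.take (seq_u.findIdx (fun x => x < w)) := by rw [hidx, hieq]
        rw [h1, pv_prefix_cap seq_u w _ (Or.inr hieq)]
      · rw [hlen] at hpost
        have hcap : max_k ≤ (idx : Int) := by
          by_contra hcon
          by_cases hidx : idx = seq_u.length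
          · exact hc ⟨by omega, by omega⟩
          · exact hc ⟨by omega, by omega⟩
        rw [pv_take_take _ _ _ (Or.inl (by omega))]
        exact (pv_full_take_le seq_u w max_k.toNat (by omega)).symm

-- ===== VERDICT (by name: the statement is the Claim_ definition above) =====
theorem insert_w_spec : Claim_equal_insert_w := by
  unfold Claim_equal_insert_w Spec_insert_w
  intro seq_u w max_k _
  by_cases hk : 0 < max_k
  · have halt : insert_w_alt seq_u w max_k
        = (seq_u.take (seq_u.findIdx (fun x => x < w)) ++ [w] ++ seq_u.drop (seq_u.findIdx (fun x => x < w))).take max_k.toNat := by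
      unfold insert_w_alt
      rw [max_eq_left hk.le]
    have hA := pv_loopA seq_u w max_k hk seq_u.length 0 (by omega) (by omega)
    simp only at hA
    unfold insert_w
    rw [PySem.List.slice_to _ (by omega), halt]
    exact hA
  · -- max_k ≤ 0: the loop never runs and both sides return []
    have hm : max max_k 0 = 0 := by omega
    unfold insert_w
    rw [insertWLoop, dif_neg (by simp only [List.length_nil]; omega)]
    simp only
    unfold insert_w_alt
    rw [hm]
    split_ifs with hpost
    · exfalso
      simp only [List.length_nil] at hpost
      omega
    · simp [PySem.List.slice, PySem.List.clampIdx]
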